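-- pv_equiv track=rewrite | github.com/QualityMinds/classroom-reputation-simulator | output/metrics.py | in_correct_zone
-- ===== SOURCE A (Python) =====
-- def count_members(data, group):
--     return len([l for (_, l, _) in data if l == group])
--
-- def in_correct_zone(groups, centrality_vector, label, index):
--     minimum = 0
--     maximum = 0
--     for i in range(0, len(groups)):
--         if groups[i] == label:
--             maximum = minimum + count_members(centrality_vector, label)
--             break
--         else:
--             minimum += count_members(centrality_vector, groups[i])
--
--     return minimum <= index < maximum
-- ===== SOURCE B (Python) =====
-- def in_correct_zone(groups, centrality_vector, label, index):
--     if label not in groups: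
--         return False
--     # multiset of group labels strictly before the first occurrence of `label`
--     mult = {}
--     for g in groups[:groups.index(label)]:
--         mult[g] = mult.get(g, 0) + 1
--     # single pass over the vector: zone start and zone size at once
--     lo = 0
--     size = 0
--     for (_, l, _) in centrality_vector:
--         lo += mult.get(l, 0)
--         if l == label:
--             size += 1
--     return lo <= index < lo + size
-- ===== Notes on version B (the rewrite author's own statement) =====
-- stated objective: faster
-- what changed: B first locates the zone via groups.index(label) (returning False immediately if absent), builds a multiset of the group labels in that prefix slice, and then makes ONE pass over centrality_vector computing the zone start and the zone size simultaneously, instead of A's loop over groups that re-scans centrality_vector for every group before the label.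
import Mathlib
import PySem

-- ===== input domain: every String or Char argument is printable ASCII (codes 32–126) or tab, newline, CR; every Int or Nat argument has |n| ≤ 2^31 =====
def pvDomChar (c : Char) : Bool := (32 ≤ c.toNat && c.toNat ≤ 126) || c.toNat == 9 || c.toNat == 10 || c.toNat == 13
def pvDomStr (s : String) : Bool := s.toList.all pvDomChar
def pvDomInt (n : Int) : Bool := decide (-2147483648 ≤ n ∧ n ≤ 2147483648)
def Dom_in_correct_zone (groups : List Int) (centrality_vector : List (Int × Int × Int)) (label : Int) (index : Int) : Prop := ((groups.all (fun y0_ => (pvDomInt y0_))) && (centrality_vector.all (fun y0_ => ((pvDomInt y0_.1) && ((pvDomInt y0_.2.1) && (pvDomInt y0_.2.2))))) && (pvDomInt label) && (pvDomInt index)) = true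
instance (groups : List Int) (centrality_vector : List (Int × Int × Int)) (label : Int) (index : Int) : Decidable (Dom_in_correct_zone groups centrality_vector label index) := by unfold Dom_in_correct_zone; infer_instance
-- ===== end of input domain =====

-- B locates the label's zone via groups.index(label), builds a multiset of the
-- prefix's labels once and scans centrality_vector a single time for zone start
-- and size, replacing A's per-group rescans (objective: faster, O(G+N) vs O(G*N)).

-- ===== PORT A =====
def count_members (data : List (Int × Int × Int)) (group : Int) : Int :=
  ((data.filter (fun t => t.2.1 == group)).length : Int)

-- A's for-loop over range(0, len(groups)) with break, as structural recursion
-- over the same elements carrying the same (minimum, maximum) state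
def in_correct_zone_loop (cv : List (Int × Int × Int)) (label : Int) :
    List Int → Int → Int → Int × Int
  | [], minimum, maximum => (minimum, maximum)
  | g :: rest, minimum, maximum =>
      if g == label then (minimum, minimum + count_members cv label)
      else in_correct_zone_loop cv label rest (minimum + count_members cv g) maximum

def in_correct_zone (groups : List Int) (centrality_vector : List (Int × Int × Int)) (label : Int) (index : Int) : Bool :=
  let p := in_correct_zone_loop centrality_vector label groups 0 0
  decide (p.1 ≤ index ∧ index < p.2)

-- ===== PORT B =====
-- mult[g] = mult.get(g, 0) + 1 over the prefix slice
def alt_mult (before : List Int) : PySem.Dict Int Int :=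
  before.foldl (fun d g => d.insert g (d.getD g 0 + 1)) PySem.Dict.empty

def in_correct_zone_alt (groups : List Int) (centrality_vector : List (Int × Int × Int)) (label : Int) (index : Int) : Bool :=
  if groups.contains label then
    let idx : Nat := (PySem.List.index? groups label).getD 0
    let before := PySem.List.slice groups none (some (idx : Int))
    let mult := alt_mult before
    let p := centrality_vector.foldl
      (fun (p : Int × Int) t =>
        (p.1 + mult.getD t.2.1 0, if t.2.1 == label then p.2 + 1 else p.2)) (0, 0)
    decide (p.1 ≤ index ∧ index < p.1 + p.2)
  else false

-- ===== PRECONDITION & SPEC =====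
def Spec_in_correct_zone (groups : List Int) (centrality_vector : List (Int × Int × Int)) (label : Int) (index : Int) (out : Bool) : Prop := out = in_correct_zone_alt groups centrality_vector label index
instance (groups : List Int) (centrality_vector : List (Int × Int × Int)) (label : Int) (index : Int) (out : Bool) : Decidable (Spec_in_correct_zone groups centrality_vector label index out) := by unfold Spec_in_correct_zone; infer_instance

-- ===== CLAIM (what is proved, stated in full; the proofs are below) =====
def Claim_equal_in_correct_zone : Prop := ∀ (groups : List Int) (centrality_vector : List (Int × Int × Int)) (label : Int) (index : Int), Dom_in_correct_zone groups centrality_vector label index → Spec_in_correct_zone groups centrality_vector label index (in_correct_zone groups centrality_vector label index)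

-- ===== LEMMAS AND PROOFS =====

lemma count_members_nonneg (cv : List (Int × Int × Int)) (v : Int) :
    0 ≤ count_members cv v := by
  simp [count_members]

lemma count_members_cons (t : Int × Int × Int) (rest : List (Int × Int × Int)) (v : Int) :
    count_members (t :: rest) v
      = (if t.2.1 == v then (1:Int) else 0) + count_members rest v := by
  simp only [count_members, List.filter_cons]
  split
  · simp only [List.length_cons]; push_cast; ring
  · ring

lemma alt_mult_getD (before : List Int) (v : Int) :
    (alt_mult before).getD v 0 = (before.count v : Int) := by
  unfold alt_mult
  rw [PySem.Dict.getD_foldl_insert_add_one]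
  simp

-- A's loop when label never occurs: maximum stays 0, minimum only grows
lemma loopA_not_mem (cv : List (Int × Int × Int)) (label : Int) :
    ∀ (gs : List Int) (m : Int), label ∉ gs → 0 ≤ m →
      (in_correct_zone_loop cv label gs m 0).2 = 0 ∧
      0 ≤ (in_correct_zone_loop cv label gs m 0).1 := by
  intro gs
  induction gs with
  | nil => intro m _ hm; simp [in_correct_zone_loop, hm]
  | cons g rest ih =>
      intro m hmem hm
      have hg : g ≠ label := fun h => hmem (h ▸ List.mem_cons_self)
      simp only [in_correct_zone_loop, beq_iff_eq, hg, if_false]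
      exact ih _ (fun h => hmem (List.mem_cons_of_mem _ h))
        (by have := count_members_nonneg cv g; omega)

-- A's loop on pre ++ label :: suf with label ∉ pre: closed form via the prefix sum
lemma loopA_mem (cv : List (Int × Int × Int)) (label : Int) (suf : List Int) :
    ∀ (pre : List Int) (m : Int), label ∉ pre →
      in_correct_zone_loop cv label (pre ++ label :: suf) m 0
        = (m + (pre.map (fun g => count_members cv g)).sum,
           m + (pre.map (fun g => count_members cv g)).sum + count_members cv label) := by
  intro pre
  induction pre with
  | nil => intro m _; simp [in_correct_zone_loop]
  | cons g rest ih =>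
      intro m hmem
      have hg : g ≠ label := fun h => hmem (h ▸ List.mem_cons_self)
      simp only [List.cons_append, in_correct_zone_loop, beq_iff_eq, hg, if_false]
      rw [ih _ (fun h => hmem (List.mem_cons_of_mem _ h))]
      simp only [List.map_cons, List.sum_cons, Prod.mk.injEq]
      constructor <;> ring

-- a 0/1-indicator sum over a list is its count
lemma sum_ite_count (ls : List Int) (g : Int) :
    (ls.map (fun l => (if l == g then (1:Int) else 0))).sum = (ls.count g : Int) := by
  induction ls with
  | nil => simp
  | cons x xs ihx =>
      simp only [List.map_cons, List.sum_cons, ihx]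
      rw [List.count_cons]
      by_cases hx : x = g
      · subst hx; simp; ring
      · simp [hx]

-- double counting: summing prefix-counts over the vector's labels equals
-- summing vector-counts over the prefix
lemma swap_count (ls : List Int) :
    ∀ before : List Int,
      (ls.map (fun l => (before.count l : Int))).sum
        = (before.map (fun g => (ls.count g : Int))).sum := by
  intro before
  induction before with
  | nil => simp
  | cons g rest ih =>
      simp only [List.map_cons, List.sum_cons]
      have hsplit : (ls.map (fun l => ((g :: rest).count l : Int))).sum
          = (ls.map (fun l => (if l == g then (1:Int) else 0))).sum
            + (ls.map (fun l => (rest.count l : Int))).sum := by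
        rw [← List.sum_map_add]
        apply congrArg
        apply List.map_congr_left
        intro l _
        rw [List.count_cons]
        by_cases h : l = g
        · simp [h]; ring
        · simp [h]; omega
      rw [hsplit, ih, sum_ite_count]

-- B's single pass over the vector, in closed form
lemma pairfold (label : Int) (mult : PySem.Dict Int Int)
    (before : List Int) (hm : ∀ v, mult.getD v 0 = (before.count v : Int)) :
    ∀ (cv : List (Int × Int × Int)) (a b : Int),
      cv.foldl (fun (p : Int × Int) t =>
          (p.1 + mult.getD t.2.1 0, if t.2.1 == label then p.2 + 1 else p.2)) (a, b)
        = (a + (cv.map (fun t => (before.count t.2.1 : Int))).sum,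
           b + count_members cv label) := by
  intro cv
  induction cv with
  | nil => intro a b; simp [count_members]
  | cons t rest ih =>
      intro a b
      simp only [List.foldl_cons]
      rw [ih]
      simp only [hm, List.map_cons, List.sum_cons, count_members_cons, Prod.mk.injEq]
      constructor
      · ring
      · by_cases ht : t.2.1 = label
        · simp [ht]; ring
        · simp [ht]

lemma count_members_eq_count (cv : List (Int × Int × Int)) (g : Int) :
    count_members cv g = ((cv.map (fun t => t.2.1)).count g : Int) := by
  rw [count_members]
  congr 1
  rw [List.count_eq_countP, List.countP_map, List.countP_eq_length_filter]
  congr 1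

-- ===== VERDICT (by name: the statement is the Claim_ definition above) =====
theorem in_correct_zone_spec : Claim_equal_in_correct_zone := by
  intro groups cv label index _
  unfold Spec_in_correct_zone in_correct_zone in_correct_zone_alt
  by_cases hmem : label ∈ groups
  · simp only [List.contains_eq_mem, hmem, decide_true, if_true]
    -- decompose groups at the first occurrence of label
    have hsome : (PySem.List.index? groups label).isSome :=
      (PySem.List.index?_isSome_iff groups label).2 hmem
    obtain ⟨k, hk⟩ := Option.isSome_iff_exists.1 hsome
    obtain ⟨pre, suf, hdecomp, hlen, hpre⟩ :=
      (PySem.List.index?_eq_some_iff groups label k).1 hk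
    have hbefore : PySem.List.slice groups none
        (some ((((PySem.List.index? groups label).getD 0) : Nat) : Int)) = pre := by
      rw [hk]
      simp only [Option.getD_some]
      rw [PySem.List.slice_to_natCast, hdecomp, ← hlen, List.take_left]
    rw [hbefore]
    rw [pairfold label (alt_mult pre) pre (fun v => alt_mult_getD pre v) cv 0 0]
    have hswap : (cv.map (fun t => (pre.count t.2.1 : Int))).sum
        = (pre.map (fun g => count_members cv g)).sum := by
      have h1 : (cv.map (fun t => (pre.count t.2.1 : Int))).sum
          = ((cv.map (fun t => t.2.1)).map (fun l => (pre.count l : Int))).sum := by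
        simp [List.map_map, Function.comp_def]
      rw [h1, swap_count]
      apply congrArg
      apply List.map_congr_left
      intro g _
      exact (count_members_eq_count cv g).symm
    rw [hdecomp, loopA_mem cv label suf pre 0 hpre]
    simp only [hswap, zero_add]
  · simp only [List.contains_eq_mem, hmem, decide_false, Bool.false_eq_true, if_false]
    obtain ⟨h2, h1⟩ := loopA_not_mem cv label groups 0 hmem le_rfl
    rw [h2]
    rw [decide_eq_false_iff_not]
    omega
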